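-- pv_equiv track=rewrite | github.com/anaclumos/Anxiolytic | Programmers/programmers49993.py | orderCheck
-- ===== SOURCE A (Python) =====
-- def orderCheck(skill, skill_tree):
--     # skt => "BACDE"
--     # sk  => "CBD"
--     forbiddenList = []
--     for s in skill_tree:
--         if s not in skill:
--             continue
--         elif s in skill[1:]:
--             return False
--         elif s == skill[0]:
--             skill = skill[1:]
--     return True
-- ===== SOURCE B (Python) =====
-- def orderCheck(skill, skill_tree):
--     need = set(skill)
--     seen = set()
--     filtered = []
--     for s in skill_tree:
--         if s in need and s not in seen:
--             seen.add(s)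
--             filtered.append(s)
--     return filtered == list(skill)[:len(filtered)]
-- ===== Notes on version B (the rewrite author's own statement) =====
-- stated objective: idiomatic
-- what changed: B replaces A's mutating slice-and-consume loop (reassigning skill = skill[1:] and membership tests on the shrinking string) with a collect-then-compare pass: it gathers the first occurrence of each skill letter found in skill_tree and checks that list is a prefix of skill.
-- outside the precondition, e.g. on orderCheck('AA', 'A'): A returns False, B returns True
import Mathlib
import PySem

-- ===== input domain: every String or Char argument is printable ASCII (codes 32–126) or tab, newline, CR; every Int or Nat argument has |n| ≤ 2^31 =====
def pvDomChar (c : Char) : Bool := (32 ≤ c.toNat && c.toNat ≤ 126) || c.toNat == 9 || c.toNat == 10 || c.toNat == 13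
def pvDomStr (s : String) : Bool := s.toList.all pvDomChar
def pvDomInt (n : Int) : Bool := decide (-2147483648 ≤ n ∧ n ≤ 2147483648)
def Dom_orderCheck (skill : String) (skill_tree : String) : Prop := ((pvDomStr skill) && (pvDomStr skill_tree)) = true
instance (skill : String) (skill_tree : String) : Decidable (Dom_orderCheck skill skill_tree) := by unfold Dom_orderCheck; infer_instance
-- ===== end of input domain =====

-- B replaces A's mutating slice-and-consume loop with an idiomatic collect-then-compare pass
-- (first occurrences of skill letters, checked to be a prefix of skill); equivalence on skills
-- with pairwise-distinct letters.


-- ===== PORT A =====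
-- loop over skill_tree with the shrinking skill (skill[1:] = drop 1, skill[0] = head?) as state
def orderCheckLoop : List Char → List Char → Bool
  | _, [] => true
  | sk, s :: rest =>
    if s ∉ sk then orderCheckLoop sk rest
    else if s ∈ sk.drop 1 then false
    else if sk.head? = some s then orderCheckLoop (sk.drop 1) rest
    else orderCheckLoop sk rest

def orderCheck (skill : String) (skill_tree : String) : Bool :=
  orderCheckLoop skill.toList skill_tree.toList

-- ===== PORT B =====
-- collect first occurrences of letters of `need` along the tree ('s in need and s not in seen')
def collectFiltered (need : PySem.Set Char) : List Char → PySem.Set Char → List Char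
  | [], _ => []
  | s :: rest, seen =>
    if s ∈ need ∧ s ∉ seen then s :: collectFiltered need rest (PySem.Set.add seen s)
    else collectFiltered need rest seen

def orderCheck_alt (skill : String) (skill_tree : String) : Bool :=
  let filtered := collectFiltered (PySem.Set.ofList skill.toList) skill_tree.toList PySem.Set.empty
  filtered = skill.toList.take filtered.length

-- ===== PRECONDITION & SPEC =====
-- Pre_ excludes inputs where some letter of skill_tree occurs more than once in skill: there A's
-- 'in skill[1:]' test can fire on a duplicate of the current head, so A's False on such degenerate
-- inputs (a required skill listed twice) is an accident of the consume-one-copy slicing.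
def Pre_orderCheck (skill : String) (skill_tree : String) : Prop :=
  (skill_tree.toList.all (fun c => skill.toList.count c ≤ 1)) = true
instance (skill : String) (skill_tree : String) : Decidable (Pre_orderCheck skill skill_tree) := by
  unfold Pre_orderCheck; infer_instance
def pvWitness_orderCheck : String × String := ("CBD", "BACDE")

def Spec_orderCheck (skill : String) (skill_tree : String) (out : Bool) : Prop := out = orderCheck_alt skill skill_tree
instance (skill : String) (skill_tree : String) (out : Bool) : Decidable (Spec_orderCheck skill skill_tree out) := by unfold Spec_orderCheck; infer_instance

-- ===== CLAIM (what is proved, stated in full; the proofs are below) =====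
def Claim_equal_orderCheck : Prop := ∀ (skill : String) (skill_tree : String), Dom_orderCheck skill skill_tree → Pre_orderCheck skill skill_tree → Spec_orderCheck skill skill_tree (orderCheck skill skill_tree)

-- ===== LEMMAS AND PROOFS =====

-- collectFiltered only inspects `seen` through membership
theorem collectFiltered_congr (need : PySem.Set Char) (tree : List Char)
    (s₁ s₂ : PySem.Set Char) (h : ∀ c, c ∈ s₁ ↔ c ∈ s₂) :
    collectFiltered need tree s₁ = collectFiltered need tree s₂ := by
  induction tree generalizing s₁ s₂ with
  | nil => rfl
  | cons s rest ih =>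
    simp only [collectFiltered, h s]
    split_ifs with hc
    · exact congrArg (s :: ·) (ih _ _ (fun c => by
        simp [PySem.Set.mem_add, h c]))
    · exact ih _ _ h

-- the invariant: A's remaining skill is a suffix r of skill = p ++ r, B's seen is (as a set) p;
-- every letter of the remaining tree occurs at most once in skill
theorem loop_eq_collect (tree p r : List Char)
    (hnd : ∀ c ∈ tree, (p ++ r).count c ≤ 1) :
    orderCheckLoop r tree =
      decide (collectFiltered (PySem.Set.ofList (p ++ r)) tree p
        = r.take (collectFiltered (PySem.Set.ofList (p ++ r)) tree p).length) := by
  induction tree generalizing p r with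
  | nil => simp [orderCheckLoop, collectFiltered]
  | cons s rest ih =>
    have hmem : ∀ c, c ∈ PySem.Set.ofList (p ++ r) ↔ c ∈ p ++ r :=
      fun c => PySem.Set.mem_ofList (p ++ r) c
    have hrest : ∀ c ∈ rest, (p ++ r).count c ≤ 1 :=
      fun c hc => hnd c (List.mem_cons_of_mem s hc)
    have hs1 : (p ++ r).count s ≤ 1 := hnd s List.mem_cons_self
    by_cases hs : s ∈ p ++ r
    · by_cases hp : s ∈ p
      · -- already consumed: both sides skip
        have hsr : s ∉ r := fun hr => by
          have h1 := List.count_pos_iff.2 hp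
          have h2 := List.count_pos_iff.2 hr
          simp [List.count_append] at hs1
          omega
        simp only [orderCheckLoop, collectFiltered, hmem s]
        rw [if_pos hsr, if_neg (by simp [hs, hp])]
        exact ih p r hrest
      · -- s is in the remaining part r
        have hsr : s ∈ r := by rcases List.mem_append.1 hs with h | h; exact absurd h hp; exact h
        obtain ⟨r0, r', rfl⟩ : ∃ r0 r', r = r0 :: r' := by
          cases r with
          | nil => simp at hsr
          | cons a b => exact ⟨a, b, rfl⟩
        simp only [orderCheckLoop, collectFiltered, hmem s, List.drop_one, List.tail_cons]
        rw [if_neg (not_not_intro hsr)]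
        by_cases ht : s ∈ r'
        · -- A returns False; B's filtered starts with s ≠ r0
          have hne : s ≠ r0 := fun he => by
            subst he
            have h2 := List.count_pos_iff.2 ht
            simp [List.count_append, List.count_cons_self] at hs1
            omega
          rw [if_pos ht, if_pos ⟨hs, hp⟩]
          simp [List.take_succ_cons, hne]
        · -- s = r0: A consumes the head, B records it
          have hse : s = r0 := by
            rcases (List.mem_cons.1 hsr) with h | h; exact h; exact absurd h ht
          subst hse
          rw [if_neg ht, if_pos (show (s :: r').head? = some s from rfl), if_pos ⟨hs, hp⟩]
          have hassoc : p ++ s :: r' = (p ++ [s]) ++ r' := by simp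
          rw [collectFiltered_congr _ rest (PySem.Set.add p s) (p ++ [s])
              (fun c => by simp [PySem.Set.mem_add, or_comm])]
          rw [hassoc, ih (p ++ [s]) r' (by simpa [← hassoc] using hrest)]
          simp [List.take_succ_cons]
    · -- s not a skill letter: both sides skip
      have hsr : s ∉ r := fun hr => hs (List.mem_append.2 (Or.inr hr))
      simp only [orderCheckLoop, collectFiltered, hmem s]
      rw [if_pos hsr, if_neg (by simp [hs])]
      exact ih p r hrest

-- ===== VERDICT (by name: the statement is the Claim_ definition above) =====
theorem orderCheck_spec : Claim_equal_orderCheck := by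
  intro skill skill_tree _ hpre
  unfold Spec_orderCheck orderCheck orderCheck_alt
  have hpre' : ∀ c ∈ skill_tree.toList, skill.toList.count c ≤ 1 := by
    simpa [Pre_orderCheck, List.all_eq_true] using hpre
  have h := loop_eq_collect skill_tree.toList [] skill.toList (by simpa using hpre')
  simpa [PySem.Set.empty] using h
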